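-- pv_equiv track=rewrite | github.com/Enorma/ALGO2020 | precedence_FINAL.py | areMergeable
-- ===== SOURCE A (Python) =====
-- def getEntrantes(A, node):
--
--     entrantes = set()
--
--     for i in A.keys():
--         for j in A[i].keys():
--             if j==node and len(A[i][j])>0:
--                 entrantes = entrantes.union(A[i][j])
--             #if
--         #for
--     #for
--
--     return entrantes
--
-- def areMergeable(A, tramas, s1, s2):
--
--     for t in tramas:
--
--         if (s1 in t) and (s2 in t):
--
--             es1 = getEntrantes(A, s1)
--             es2 = getEntrantes(A, s2)
--
--             common = es1.intersection(es2)
--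
--             if len(common)>0:
--                 return True
--             #if
--         #if
--     #for
--
--     return False
-- ===== SOURCE B (Python) =====
-- def areMergeable(A, tramas, s1, s2):
--     if not any((s1 in t) and (s2 in t) for t in tramas):
--         return False
--     incoming = {}
--     for srcs in A.values():
--         for dst, lst in srcs.items():
--             if len(lst) > 0:
--                 incoming[dst] = incoming.get(dst, set()).union(lst)
--     return not incoming.get(s1, set()).isdisjoint(incoming.get(s2, set()))
-- ===== Notes on version B (the rewrite author's own statement) =====
-- stated objective: alternative
-- what changed: Instead of re-running a full per-node graph scan (getEntrantes) for every trama containing both states, B checks the trama guard once, builds an incoming-edge index dict in a single pass over the graph, and tests disjointness of the two looked-up source sets.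
import Mathlib
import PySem

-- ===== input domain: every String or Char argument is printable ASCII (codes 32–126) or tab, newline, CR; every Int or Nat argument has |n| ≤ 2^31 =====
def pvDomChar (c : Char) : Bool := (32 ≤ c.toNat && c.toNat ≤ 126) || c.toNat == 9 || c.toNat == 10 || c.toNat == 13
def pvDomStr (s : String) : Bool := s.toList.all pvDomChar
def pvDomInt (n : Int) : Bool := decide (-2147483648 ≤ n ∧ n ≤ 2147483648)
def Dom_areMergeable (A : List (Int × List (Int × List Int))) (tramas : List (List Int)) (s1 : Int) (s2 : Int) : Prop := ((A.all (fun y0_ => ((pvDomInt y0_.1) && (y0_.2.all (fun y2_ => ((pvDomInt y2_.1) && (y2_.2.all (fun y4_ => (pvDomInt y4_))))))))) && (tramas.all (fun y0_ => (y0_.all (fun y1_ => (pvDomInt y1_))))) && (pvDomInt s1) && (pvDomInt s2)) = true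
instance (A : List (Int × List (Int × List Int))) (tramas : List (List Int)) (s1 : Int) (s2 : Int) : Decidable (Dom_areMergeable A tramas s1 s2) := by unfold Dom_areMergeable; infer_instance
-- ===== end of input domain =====

-- B replaces A's per-trama full-graph scans with one trama-guard check plus a single-pass
-- incoming-edge index dict (objective: alternative; same return value everywhere).
-- ===== PORT A =====
-- getEntrantes: nested scan over the whole graph collecting sources of edges into `node`
def getEntrantesA (A : List (Int × List (Int × List Int))) (node : Int) : PySem.Set Int :=
  (PySem.Dict.ofList A).items.foldl (fun ent pi =>
    (PySem.Dict.ofList pi.2).items.foldl (fun ent pj =>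
      if pj.1 == node && pj.2.length > 0 then PySem.Set.union ent pj.2 else ent) ent)
    PySem.Set.empty

-- the 'for t in tramas' loop with early return
def areMergeableGo (A : List (Int × List (Int × List Int))) (s1 : Int) (s2 : Int) : List (List Int) → Bool
  | [] => false
  | t :: rest =>
    if t.contains s1 && t.contains s2 then
      let es1 := getEntrantesA A s1
      let es2 := getEntrantesA A s2
      let common := PySem.Set.inter es1 es2
      if common.length > 0 then true else areMergeableGo A s1 s2 rest
    else areMergeableGo A s1 s2 rest

def areMergeable (A : List (Int × List (Int × List Int))) (tramas : List (List Int)) (s1 : Int) (s2 : Int) : Bool :=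
  areMergeableGo A s1 s2 tramas

-- ===== PORT B =====
-- one pass over the graph building the destination -> incoming-sources index
def buildIncoming (A : List (Int × List (Int × List Int))) : PySem.Dict Int (PySem.Set Int) :=
  (PySem.Dict.ofList A).items.foldl (fun d pi =>
    (PySem.Dict.ofList pi.2).items.foldl (fun d pj =>
      if pj.2.length > 0 then d.insert pj.1 (PySem.Set.union (d.getD pj.1 PySem.Set.empty) pj.2) else d) d)
    PySem.Dict.empty

def areMergeable_alt (A : List (Int × List (Int × List Int))) (tramas : List (List Int)) (s1 : Int) (s2 : Int) : Bool :=
  if !(tramas.any fun t => t.contains s1 && t.contains s2) then false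
  else
    let incoming := buildIncoming A
    !(PySem.Set.isdisjoint (incoming.getD s1 PySem.Set.empty) (incoming.getD s2 PySem.Set.empty))

-- ===== PRECONDITION & SPEC =====
def Spec_areMergeable (A : List (Int × List (Int × List Int))) (tramas : List (List Int)) (s1 : Int) (s2 : Int) (out : Bool) : Prop := out = areMergeable_alt A tramas s1 s2
instance (A : List (Int × List (Int × List Int))) (tramas : List (List Int)) (s1 : Int) (s2 : Int) (out : Bool) : Decidable (Spec_areMergeable A tramas s1 s2 out) := by unfold Spec_areMergeable; infer_instance

-- ===== CLAIM (what is proved, stated in full; the proofs are below) =====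
def Claim_equal_areMergeable : Prop := ∀ (A : List (Int × List (Int × List Int))) (tramas : List (List Int)) (s1 : Int) (s2 : Int), Dom_areMergeable A tramas s1 s2 → Spec_areMergeable A tramas s1 s2 (areMergeable A tramas s1 s2)

-- ===== LEMMAS AND PROOFS =====

-- disjointness test vs. non-empty intersection
theorem pv_inter_isdisjoint (s t : PySem.Set Int) :
    (decide (0 < (PySem.Set.inter s t).length)) = !(PySem.Set.isdisjoint s t) := by
  cases h : PySem.Set.isdisjoint s t
  · have h' : ¬ (∀ x ∈ s, x ∉ t) := by
      intro hall
      rw [← PySem.Set.isdisjoint_iff] at hall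
      simp [h] at hall
    push Not at h'
    obtain ⟨x, hxs, hxt⟩ := h'
    simp only [Bool.not_false, decide_eq_true_eq]
    rw [List.length_pos_iff]
    intro hnil
    have : x ∈ PySem.Set.inter s t := (PySem.Set.mem_inter _ _ _).mpr ⟨hxs, hxt⟩
    simp [hnil] at this
  · have h' := (PySem.Set.isdisjoint_iff _ _).mp h
    simp only [Bool.not_true, decide_eq_false_iff_not]
    intro hlen
    rw [List.length_pos_iff] at hlen
    obtain ⟨x, hx⟩ := List.exists_mem_of_ne_nil _ hlen
    rw [PySem.Set.mem_inter] at hx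
    exact h' x hx.1 hx.2

-- inner pass of the index construction, read back at one key
theorem pv_inner_getD (ps : List (Int × List Int)) (d : PySem.Dict Int (PySem.Set Int)) (s : Int) :
    (ps.foldl (fun d pj =>
        if pj.2.length > 0 then d.insert pj.1 (PySem.Set.union (d.getD pj.1 PySem.Set.empty) pj.2) else d) d).getD s PySem.Set.empty
    = ps.foldl (fun ent pj =>
        if pj.1 == s && pj.2.length > 0 then PySem.Set.union ent pj.2 else ent) (d.getD s PySem.Set.empty) := by
  induction ps generalizing d with
  | nil => rfl
  | cons p ps ih =>
    simp only [List.foldl_cons]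
    by_cases hl : p.2.length > 0
    · by_cases he : p.1 = s
      · subst he
        rw [if_pos hl, ih]
        simp [hl]
      · rw [if_pos hl, ih, PySem.Dict.getD_insert, if_neg (Ne.symm he)]
        simp [he]
    · rw [if_neg hl, ih]
      simp [hl]

-- the whole index, read back at one key, is exactly getEntrantes
theorem pv_incoming_getD (A : List (Int × List (Int × List Int))) (s : Int) :
    (buildIncoming A).getD s PySem.Set.empty = getEntrantesA A s := by
  unfold buildIncoming getEntrantesA
  have hgen : ∀ (rows : List (Int × List (Int × List Int))) (d : PySem.Dict Int (PySem.Set Int)),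
      (rows.foldl (fun d pi =>
          (PySem.Dict.ofList pi.2).items.foldl (fun d pj =>
            if pj.2.length > 0 then d.insert pj.1 (PySem.Set.union (d.getD pj.1 PySem.Set.empty) pj.2) else d) d) d).getD s PySem.Set.empty
      = rows.foldl (fun ent pi =>
          (PySem.Dict.ofList pi.2).items.foldl (fun ent pj =>
            if pj.1 == s && pj.2.length > 0 then PySem.Set.union ent pj.2 else ent) ent) (d.getD s PySem.Set.empty) := by
    intro rows
    induction rows with
    | nil => intro d; rfl
    | cons r rows ih =>
      intro d
      simp only [List.foldl_cons]
      rw [ih, pv_inner_getD]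
  have := hgen (PySem.Dict.ofList A).items PySem.Dict.empty
  simpa using this

-- A's trama loop, characterised
theorem pv_go_eq (A : List (Int × List (Int × List Int))) (s1 s2 : Int) (ts : List (List Int)) :
    areMergeableGo A s1 s2 ts
    = ((ts.any fun t => t.contains s1 && t.contains s2)
        && decide (0 < (PySem.Set.inter (getEntrantesA A s1) (getEntrantesA A s2)).length)) := by
  induction ts with
  | nil => simp [areMergeableGo]
  | cons t rest ih =>
    simp only [areMergeableGo]
    rw [List.any_cons, ih]
    by_cases hc : (t.contains s1 && t.contains s2) = true
    · rw [if_pos hc, hc, Bool.true_or]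
      by_cases hl : 0 < (PySem.Set.inter (getEntrantesA A s1) (getEntrantesA A s2)).length
      · simp [hl]
      · simp [hl]
    · rw [if_neg hc]
      simp only [Bool.not_eq_true] at hc
      rw [hc, Bool.false_or]

-- ===== VERDICT (by name: the statement is the Claim_ definition above) =====
theorem areMergeable_spec : Claim_equal_areMergeable := by
  intro A tramas s1 s2 _
  unfold Spec_areMergeable areMergeable areMergeable_alt
  rw [pv_go_eq]
  cases h : tramas.any fun t => t.contains s1 && t.contains s2
  · simp
  · simp only [Bool.not_true, Bool.true_and]
    rw [pv_incoming_getD, pv_incoming_getD, pv_inter_isdisjoint]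
    simp
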